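-- pv_equiv track=rewrite | github.com/nima9/csc322-p1 | p1/sud2sat2.py | at_least_one_num
-- ===== SOURCE A (Python) =====
-- def do_the_math(i, j, k, size):
--     return size**2 * (i - 1) + size * (j - 1) + k
--
-- def at_least_one_num(size):
--     clauses = []
--     for i in range(1, size + 1):
--         for j in range(1, size + 1):
--             clause = []
--             for k in range(1, size + 1):
--                 clause.append(do_the_math(i, j, k, size))
--             clauses.append(clause)
--     return clauses
-- ===== SOURCE B (Python) =====
-- def at_least_one_num(size):
--     if size <= 0:
--         return []
--     flat = list(range(1, size ** 3 + 1))
--     return [flat[b:b + size] for b in range(0, size ** 3, size)]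
-- ===== Notes on version B (the rewrite author's own statement) =====
-- stated objective: alternative
-- what changed: B builds the flat consecutive sequence 1..size**3 once with a single range and chunks it into size-length slices, instead of three nested loops computing each literal from (i,j,k) with per-element arithmetic.
import Mathlib
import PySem

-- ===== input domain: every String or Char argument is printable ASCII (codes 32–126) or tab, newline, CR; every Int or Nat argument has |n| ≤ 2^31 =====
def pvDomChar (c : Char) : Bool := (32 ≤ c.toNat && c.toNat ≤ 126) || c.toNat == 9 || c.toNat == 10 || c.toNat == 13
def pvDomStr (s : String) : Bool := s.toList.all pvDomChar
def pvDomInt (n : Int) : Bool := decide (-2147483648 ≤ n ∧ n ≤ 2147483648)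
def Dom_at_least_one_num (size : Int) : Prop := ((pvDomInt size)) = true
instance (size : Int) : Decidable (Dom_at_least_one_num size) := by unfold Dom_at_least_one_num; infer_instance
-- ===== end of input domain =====

-- B builds the flat consecutive list 1..size^3 once and chunks it into size-length slices,
-- instead of A's three nested loops with per-element arithmetic (alternative decomposition, same cost).


-- ===== PORT A =====
def do_the_math (i j k size : Int) : Int := size ^ 2 * (i - 1) + size * (j - 1) + k

def at_least_one_num (size : Int) : List (List Int) :=
  (PySem.List.pyRange 1 (size + 1) 1).foldl (fun clauses i =>
    (PySem.List.pyRange 1 (size + 1) 1).foldl (fun clauses j =>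
      clauses ++ [(PySem.List.pyRange 1 (size + 1) 1).foldl (fun clause k =>
        clause ++ [do_the_math i j k size]) []]) clauses) []

-- ===== PORT B =====
def at_least_one_num_alt (size : Int) : List (List Int) :=
  if size ≤ 0 then []
  else
    let flat := PySem.List.pyRange 1 (size ^ 3 + 1) 1
    (PySem.List.pyRange 0 (size ^ 3) size).map
      (fun b => PySem.List.slice flat (some b) (some (b + size)))

-- ===== PRECONDITION & SPEC =====
def Spec_at_least_one_num (size : Int) (out : List (List Int)) : Prop := out = at_least_one_num_alt size
instance (size : Int) (out : List (List Int)) : Decidable (Spec_at_least_one_num size out) := by unfold Spec_at_least_one_num; infer_instance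

-- ===== CLAIM (what is proved, stated in full; the proofs are below) =====
def Claim_equal_at_least_one_num : Prop := ∀ (size : Int), Dom_at_least_one_num size → Spec_at_least_one_num size (at_least_one_num size)

-- ===== LEMMAS AND PROOFS =====

-- generic chunking fact: an m×n double loop indexed by n*a+b is one flat range of m*n
theorem pv_flat_blocks {α : Type} (f : Nat → α) (m n : Nat) :
    (List.range m).flatMap (fun a => (List.range n).map (fun b => f (n * a + b)))
      = (List.range (m * n)).map f := by
  induction m with
  | zero => simp
  | succ m ih =>
    rw [List.range_succ, List.flatMap_append, ih, Nat.succ_mul, List.range_add,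
      List.map_append, List.flatMap_singleton, List.map_map]
    congr 1
    apply List.map_congr_left
    intro b _
    simp [Nat.mul_comm]

-- A in canonical form, for positive size (n = size.toNat)
theorem pv_A_canon (size : Int) (hpos : 0 < size) :
    at_least_one_num size
      = (List.range (size.toNat * size.toNat)).map
          (fun c : Nat => (List.range size.toNat).map
            (fun t : Nat => size * (c : Int) + (t : Int) + 1)) := by
  have hsz : ((size.toNat : Int)) = size := by omega
  unfold at_least_one_num
  simp only [PySem.List.foldl_append_singleton_eq_map]
  rw [PySem.List.foldl_append_eq_flatMap, List.nil_append]
  simp only [PySem.List.pyRange_one]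
  have hn : ((size + 1 : Int) - 1).toNat = size.toNat := by omega
  rw [hn, List.flatMap_map]
  rw [← pv_flat_blocks (fun c : Nat => (List.range size.toNat).map
        (fun t : Nat => size * (c : Int) + (t : Int) + 1)) size.toNat size.toNat]
  apply List.flatMap_congr
  intro a _
  rw [List.map_map]
  apply List.map_congr_left
  intro b _
  simp only [Function.comp_apply]
  rw [List.map_map]
  apply List.map_congr_left
  intro t _
  simp only [Function.comp_apply, do_the_math]
  push_cast
  rw [hsz]
  ring

-- B in canonical form, for positive size
theorem pv_B_canon (size : Int) (hpos : 0 < size) :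
    at_least_one_num_alt size
      = (List.range (size.toNat * size.toNat)).map
          (fun c : Nat => (List.range size.toNat).map
            (fun t : Nat => size * (c : Int) + (t : Int) + 1)) := by
  have hsz : ((size.toNat : Int)) = size := by omega
  set n := size.toNat with hn
  unfold at_least_one_num_alt
  rw [if_neg (by omega)]
  have hcount : (if (0 : Int) < size ^ 3 then ((size ^ 3 - 0 + size - 1) / size).toNat else 0)
      = n * n := by
    rw [if_pos (by positivity)]
    have h1 : (size ^ 3 - 0 + size - 1) = (size - 1) + (size * size) * size := by ring
    rw [h1, Int.add_mul_ediv_right _ _ (by omega),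
      Int.ediv_eq_zero_of_lt (by omega) (by omega), zero_add]
    have h2 : size * size = ((n * n : Nat) : Int) := by push_cast; rw [hsz]
    rw [h2, Int.toNat_natCast]
  rw [PySem.List.pyRange_of_pos 0 (size ^ 3) hpos, hcount, List.map_map]
  apply List.map_congr_left
  intro c hc
  have hc' : c < n * n := List.mem_range.mp hc
  simp only [Function.comp_apply, zero_add]
  have hb : size * (c : Int) = ((n * c : Nat) : Int) := by push_cast; rw [hsz]
  rw [hb, ← hsz, PySem.List.slice_natCast_add, PySem.List.pyRange_one]
  have h3 : ((n : Int) ^ 3 + 1 - 1).toNat = n * n * n := by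
    have : ((n : Int) ^ 3 + 1 - 1) = ((n * n * n : Nat) : Int) := by push_cast; ring
    rw [this, Int.toNat_natCast]
  rw [h3, ← List.map_drop, ← List.map_take]
  rw [List.range_eq_range', List.drop_range']
  simp only [Nat.zero_add, Nat.mul_one]
  have htake : (List.range' (n * c) (n * n * n - n * c)).take n = List.range' (n * c) n := by
    have hsplit : List.range' (n * c) (n * n * n - n * c)
        = List.range' (n * c) n ++ List.range' (n * c + n) (n * n * n - n * c - n) := by
      rw [List.range'_append_1]
      congr 1
      have : n * c + n ≤ n * n * n := by nlinarith
      omega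
    rw [hsplit]
    simp
  rw [htake, List.range'_eq_map_range, List.map_map]
  apply List.map_congr_left
  intro t _
  simp only [Function.comp_apply]
  push_cast
  rw [hsz]
  ring

-- ===== VERDICT (by name: the statement is the Claim_ definition above) =====
theorem at_least_one_num_spec : Claim_equal_at_least_one_num := by
  intro size _
  unfold Spec_at_least_one_num
  by_cases hpos : 0 < size
  · rw [pv_A_canon size hpos, pv_B_canon size hpos]
  · unfold at_least_one_num at_least_one_num_alt
    rw [PySem.List.pyRange_one_eq_nil (by omega), if_pos (by omega)]
    rfl
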